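-- pv_equiv track=rewrite | github.com/ronghanghu/lcgn | models_gqa/vis.py | _find_txt_segs
-- ===== SOURCE A (Python) =====
-- def _find_txt_segs(words, keep):
--     segs = []
--     current_seg = []
--     for n, k in enumerate(keep):
--         if k:
--             current_seg.append(words[n])
--         else:
--             if len(current_seg) > 0:
--                 segs.append('"%s"' % ' '.join(current_seg))
--             current_seg = []
--     if len(current_seg) > 0:
--         segs.append('"%s"' % ' '.join(current_seg))
--     return segs
-- ===== SOURCE B (Python) =====
-- def _find_txt_segs(words, keep):
--     # Two-pointer run scan: find each maximal run of truthy keep flags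
--     # and emit its quoted segment directly (no accumulator/flush state).
--     n = len(keep)
--     segs = []
--     i = 0
--     while i < n:
--         if keep[i]:
--             j = i
--             while j < n and keep[j]:
--                 j += 1
--             segs.append('"%s"' % ' '.join(words[k] for k in range(i, j)))
--             i = j
--         else:
--             i += 1
--     return segs
-- ===== Notes on version B (the rewrite author's own statement) =====
-- stated objective: alternative
-- what changed: Replaces A's accumulator-and-flush state machine (append word / flush on falsy flag / final flush) with a two-pointer scan that locates each maximal run of truthy keep flags and emits its quoted segment directly from the run's index range.
import Mathlib
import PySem

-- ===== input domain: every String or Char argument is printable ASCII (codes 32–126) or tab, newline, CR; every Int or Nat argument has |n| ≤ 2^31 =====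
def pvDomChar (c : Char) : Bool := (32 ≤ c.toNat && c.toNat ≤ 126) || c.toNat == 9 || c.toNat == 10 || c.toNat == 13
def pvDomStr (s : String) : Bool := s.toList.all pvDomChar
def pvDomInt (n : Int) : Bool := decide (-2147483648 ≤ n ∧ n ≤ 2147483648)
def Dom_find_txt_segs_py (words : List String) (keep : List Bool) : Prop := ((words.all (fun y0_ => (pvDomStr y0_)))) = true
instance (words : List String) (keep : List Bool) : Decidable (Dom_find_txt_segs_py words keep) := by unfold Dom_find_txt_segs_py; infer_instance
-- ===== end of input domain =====

-- B replaces A's accumulator-and-flush loop by a two-pointer scan that finds each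
-- maximal run of kept indices and emits its quoted segment directly (objective: alternative
-- decomposition, same cost).

-- '"%s"' % ' '.join(seg)  (shared trivial formatter used by both ports)
def pvSeg (seg : List String) : String := "\"" ++ PySem.Str.join " " seg ++ "\""

-- words[n] for a nonnegative index n (in-range inside Pre_; getD "" only totalises the port)
def pvW (words : List String) (n : Int) : String := (PySem.List.pyGet? words n).getD ""

-- ===== PORT A =====
-- loop body of A: state (segs, current_seg), one enumerate item (n, k)
def pvStepA (words : List String) (st : List String × List String) (p : Int × Bool) :
    List String × List String :=
  if p.2 then (st.1, st.2 ++ [pvW words p.1])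
  else if st.2.length > 0 then (st.1 ++ [pvSeg st.2], []) else (st.1, [])

def find_txt_segs_py (words : List String) (keep : List Bool) : List String :=
  let st := (PySem.List.enumerate keep 0).foldl (pvStepA words) ([], [])
  if st.2.length > 0 then st.1 ++ [pvSeg st.2] else st.1

-- ===== PORT B =====
-- inner `while j < n and keep[j]: j += 1`
def pvRunEnd (keep : List Bool) (j : Nat) : Nat :=
  if h : j < keep.length then
    if keep[j] then pvRunEnd keep (j + 1) else j
  else j
  termination_by keep.length - j
  decreasing_by omega

-- j ≤ pvRunEnd keep j (needed for termination of the outer loop)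
theorem pvRunEnd_ge (keep : List Bool) (j : Nat) : j ≤ pvRunEnd keep j := by
  unfold pvRunEnd
  split
  · split
    · exact le_trans (Nat.le_succ j) (pvRunEnd_ge keep (j + 1))
    · exact le_refl j
  · exact le_refl j
  termination_by keep.length - j
  decreasing_by omega

theorem pvRunEnd_succ (keep : List Bool) (i : Nat) (hi : i < keep.length)
    (hk : keep[i] = true) : pvRunEnd keep i = pvRunEnd keep (i + 1) := by
  rw [pvRunEnd]; simp [hi, hk]

-- outer `while i < n` of B
def pvAltGo (words : List String) (keep : List Bool) (i : Nat) : List String :=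
  if h : i < keep.length then
    if hk : keep[i] then
      let j := pvRunEnd keep i
      pvSeg ((PySem.List.pyRange (i : Int) (j : Int) 1).map (pvW words)) :: pvAltGo words keep j
    else pvAltGo words keep (i + 1)
  else []
  termination_by keep.length - i
  decreasing_by
  · have h1 : i + 1 ≤ pvRunEnd keep (i + 1) := pvRunEnd_ge keep (i + 1)
    have h2 : pvRunEnd keep i = pvRunEnd keep (i + 1) := pvRunEnd_succ keep i h hk
    omega
  · omega

def find_txt_segs_py_alt (words : List String) (keep : List Bool) : List String :=
  pvAltGo words keep 0

-- ===== PRECONDITION & SPEC =====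
-- Pre_ excludes exactly the inputs where A raises IndexError: a truthy keep flag at an
-- index with no corresponding word.
def Pre_find_txt_segs_py (words : List String) (keep : List Bool) : Prop :=
  ∀ i < keep.length, keep.getD i false = true → i < words.length
instance (words : List String) (keep : List Bool) : Decidable (Pre_find_txt_segs_py words keep) := by
  unfold Pre_find_txt_segs_py; infer_instance

def pvWitness_find_txt_segs_py : List String × List Bool :=
  (["the", "red", "cube"], [true, false, true])

def Spec_find_txt_segs_py (words : List String) (keep : List Bool) (out : List String) : Prop :=
  out = find_txt_segs_py_alt words keep
instance (words : List String) (keep : List Bool) (out : List String) :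
    Decidable (Spec_find_txt_segs_py words keep out) := by
  unfold Spec_find_txt_segs_py; infer_instance

-- ===== CLAIM (what is proved, stated in full; the proofs are below) =====
def Claim_equal_find_txt_segs_py : Prop := ∀ (words : List String) (keep : List Bool), Dom_find_txt_segs_py words keep → Pre_find_txt_segs_py words keep → Spec_find_txt_segs_py words keep (find_txt_segs_py words keep)

-- ===== LEMMAS AND PROOFS =====

-- A's loop, re-indexed: fold from position i (proof helper)
def pvLoopA (words : List String) (keep : List Bool) (st : List String × List String) (i : Nat) :
    List String × List String :=
  if h : i < keep.length then
    pvLoopA words keep (pvStepA words st ((i : Int), keep[i])) (i + 1)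
  else st
  termination_by keep.length - i
  decreasing_by omega

def pvFinish (st : List String × List String) : List String :=
  if st.2.length > 0 then st.1 ++ [pvSeg st.2] else st.1

theorem pvRunEnd_stop (keep : List Bool) (j : Nat) :
    ¬ (pvRunEnd keep j < keep.length ∧ keep.getD (pvRunEnd keep j) false = true) := by
  unfold pvRunEnd
  split
  · rename_i h
    split
    · exact pvRunEnd_stop keep (j + 1)
    · rename_i hk
      intro ⟨h1, h2⟩
      rw [List.getD_eq_getElem keep false h] at h2
      exact hk h2
  · rename_i h
    intro ⟨h1, _⟩
    exact h h1
  termination_by keep.length - j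
  decreasing_by omega

-- the fold over enumerate equals pvLoopA
theorem pvFoldl_enum (words : List String) (keep : List Bool) :
    ∀ (d i : Nat) (st : List String × List String), keep.length - i ≤ d →
      (PySem.List.enumerate (keep.drop i) (i : Int)).foldl (pvStepA words) st =
        pvLoopA words keep st i := by
  intro d
  induction d with
  | zero =>
    intro i st h
    have hge : keep.length ≤ i := by omega
    rw [List.drop_eq_nil_of_le hge]
    rw [pvLoopA]
    simp [PySem.List.enumerate, Nat.not_lt.mpr hge]
  | succ d ih =>
    intro i st h
    by_cases hi : i < keep.length
    · have hdrop : keep.drop i = keep[i] :: keep.drop (i + 1) :=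
        (List.getElem_cons_drop hi).symm
      rw [hdrop, PySem.List.enumerate_cons]
      rw [pvLoopA]
      simp only [hi, dif_pos]
      have : ((i : Int) + 1) = ((i + 1 : Nat) : Int) := by push_cast; ring
      rw [List.foldl_cons, this, ih (i + 1) _ (by omega)]
    · have hge : keep.length ≤ i := by omega
      rw [List.drop_eq_nil_of_le hge]
      rw [pvLoopA]
      simp [PySem.List.enumerate, hi]

-- a maximal run of trues is absorbed into the accumulator in one step
theorem pvRun_absorb (words : List String) (keep : List Bool) :
    ∀ (d i : Nat) (segs cur : List String), keep.length - i ≤ d →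
      pvLoopA words keep (segs, cur) i =
        pvLoopA words keep
          (segs, cur ++ (PySem.List.pyRange (i : Int) ((pvRunEnd keep i : Nat) : Int) 1).map (pvW words))
          (pvRunEnd keep i) := by
  intro d
  induction d with
  | zero =>
    intro i segs cur h
    have hge : keep.length ≤ i := by omega
    have he : pvRunEnd keep i = i := by
      unfold pvRunEnd; simp [Nat.not_lt.mpr hge]
    rw [he]
    simp
  | succ d ih =>
    intro i segs cur h
    by_cases hi : i < keep.length
    · by_cases hk : keep[i] = true
      · have he : pvRunEnd keep i = pvRunEnd keep (i + 1) := pvRunEnd_succ keep i hi hk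
        have hgt : i + 1 ≤ pvRunEnd keep (i + 1) := pvRunEnd_ge keep (i + 1)
        rw [pvLoopA]
        simp only [hi, dif_pos]
        have hstep : pvStepA words (segs, cur) ((i : Int), keep[i]) = (segs, cur ++ [pvW words i]) := by
          simp [pvStepA, hk]
        rw [hstep, ih (i + 1) segs (cur ++ [pvW words i]) (by omega), he]
        congr 1
        have hcons : PySem.List.pyRange (i : Int) ((pvRunEnd keep (i + 1) : Nat) : Int) 1 =
            (i : Int) :: PySem.List.pyRange ((i : Int) + 1) ((pvRunEnd keep (i + 1) : Nat) : Int) 1 := by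
          apply PySem.List.pyRange_one_cons
          exact_mod_cast hgt
        have hcast : ((i : Int) + 1) = ((i + 1 : Nat) : Int) := by push_cast; ring
        rw [hcons, hcast, List.map_cons]
        simp [List.append_assoc]
      · have he : pvRunEnd keep i = i := by
          unfold pvRunEnd; simp [hi, hk]
        rw [he]
        simp
    · have hge : keep.length ≤ i := by omega
      have he : pvRunEnd keep i = i := by
        unfold pvRunEnd; simp [Nat.not_lt.mpr hge]
      rw [he]
      simp

-- the main invariant: flushing A's loop from i with empty pending segment gives B's runs
theorem pvMain (words : List String) (keep : List Bool) :
    ∀ (d i : Nat) (segs : List String), keep.length - i ≤ d →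
      pvFinish (pvLoopA words keep (segs, []) i) = segs ++ pvAltGo words keep i := by
  intro d
  induction d with
  | zero =>
    intro i segs h
    have hge : keep.length ≤ i := by omega
    rw [pvLoopA, pvAltGo]
    simp [Nat.not_lt.mpr hge, pvFinish]
  | succ d ih =>
    intro i segs h
    by_cases hi : i < keep.length
    · by_cases hk : keep[i] = true
      · -- a run starts at i
        set e := pvRunEnd keep i with hedef
        have hgt : i + 1 ≤ e := by
          have h1 : pvRunEnd keep i = pvRunEnd keep (i + 1) := pvRunEnd_succ keep i hi hk
          have := pvRunEnd_ge keep (i + 1)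
          omega
        have hstop := pvRunEnd_stop keep i
        rw [pvRun_absorb words keep (keep.length - i) i segs [] (by omega)]
        simp only [List.nil_append, ← hedef]
        set r := (PySem.List.pyRange (i : Int) ((e : Nat) : Int) 1).map (pvW words) with hrdef
        have hrne : r ≠ [] := by
          rw [hrdef]
          have : PySem.List.pyRange (i : Int) ((e : Nat) : Int) 1 =
              (i : Int) :: PySem.List.pyRange ((i : Int) + 1) ((e : Nat) : Int) 1 := by
            apply PySem.List.pyRange_one_cons
            exact_mod_cast hgt
          rw [this]
          simp
        rw [pvAltGo]
        simp only [hi, dif_pos, hk, dif_pos]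
        simp only [← hedef, ← hrdef]
        by_cases hel : e < keep.length
        · -- keep[e] is false there
          have hkf : keep.getD e false = false := by
            by_contra hc
            exact hstop ⟨hel, by simpa using hc⟩
          have hkf' : keep[e] = false := by
            rw [List.getD_eq_getElem keep false hel] at hkf
            exact hkf
          rw [pvLoopA, dif_pos hel]
          have hstep : pvStepA words (segs, r) ((e : Int), keep[e]) = (segs ++ [pvSeg r], []) := by
            simp [pvStepA, hkf', List.length_pos_iff.mpr hrne]
          rw [hstep, ih (e + 1) (segs ++ [pvSeg r]) (by omega)]
          have halt : pvAltGo words keep e = pvAltGo words keep (e + 1) := by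
            rw [pvAltGo]
            simp [hel, hkf']
          rw [halt]
          simp
        · rw [pvLoopA, dif_neg hel]
          have halt : pvAltGo words keep e = [] := by
            rw [pvAltGo]; simp [hel]
          rw [halt]
          simp [pvFinish, List.length_pos_iff.mpr hrne]
      · rw [pvLoopA]
        simp only [hi, dif_pos]
        have hstep : pvStepA words (segs, ([] : List String)) ((i : Int), keep[i]) = (segs, []) := by
          simp [pvStepA, hk]
        rw [hstep, ih (i + 1) segs (by omega)]
        conv_rhs => rw [pvAltGo]
        simp [hi, hk]
    · rw [pvLoopA, pvAltGo]
      simp [hi, pvFinish]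

-- ===== VERDICT (by name: the statement is the Claim_ definition above) =====
theorem find_txt_segs_py_spec : Claim_equal_find_txt_segs_py := by
  intro words keep _ _
  unfold Spec_find_txt_segs_py find_txt_segs_py find_txt_segs_py_alt
  have h0 : (PySem.List.enumerate keep 0).foldl (pvStepA words) ([], []) =
      pvLoopA words keep ([], []) 0 := by
    have := pvFoldl_enum words keep keep.length 0 ([], []) (by omega)
    simpa using this
  show pvFinish ((PySem.List.enumerate keep 0).foldl (pvStepA words) ([], [])) = _
  rw [h0]
  have := pvMain words keep keep.length 0 [] (by omega)
  simpa using this
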